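-- pv_equiv track=rewrite | github.com/dpan538/Words-Over-Time | scripts/scrape_hub_evidence_strengthening.py | ia_file_names
-- ===== SOURCE A (Python) =====
-- from typing import Any
--
-- def ia_file_names(metadata: dict[str, Any]) -> tuple[str | None, str | None]:
--     text_name = None
--     xml_name = None
--     for file_record in metadata.get("files", []):
--         name = file_record.get("name", "")
--         if name.endswith("_djvu.txt") and text_name is None:
--             text_name = name
--         elif name.endswith("_djvu.xml") and xml_name is None:
--             xml_name = name
--     return text_name, xml_name
-- ===== SOURCE B (Python) =====
-- from typing import Any
--
-- def ia_file_names(metadata: dict[str, Any]) -> tuple[str | None, str | None]: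
--     files = metadata.get("files", [])
--     text_name = next((f.get("name", "") for f in files
--                       if f.get("name", "").endswith("_djvu.txt")), None)
--     xml_name = next((f.get("name", "") for f in files
--                      if f.get("name", "").endswith("_djvu.xml")), None)
--     return text_name, xml_name
-- ===== Notes on version B (the rewrite author's own statement) =====
-- stated objective: idiomatic
-- what changed: Replaces the single loop threading two sentinel variables through an if/elif chain with two independent first-match searches via next() over generator expressions.
import Mathlib
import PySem

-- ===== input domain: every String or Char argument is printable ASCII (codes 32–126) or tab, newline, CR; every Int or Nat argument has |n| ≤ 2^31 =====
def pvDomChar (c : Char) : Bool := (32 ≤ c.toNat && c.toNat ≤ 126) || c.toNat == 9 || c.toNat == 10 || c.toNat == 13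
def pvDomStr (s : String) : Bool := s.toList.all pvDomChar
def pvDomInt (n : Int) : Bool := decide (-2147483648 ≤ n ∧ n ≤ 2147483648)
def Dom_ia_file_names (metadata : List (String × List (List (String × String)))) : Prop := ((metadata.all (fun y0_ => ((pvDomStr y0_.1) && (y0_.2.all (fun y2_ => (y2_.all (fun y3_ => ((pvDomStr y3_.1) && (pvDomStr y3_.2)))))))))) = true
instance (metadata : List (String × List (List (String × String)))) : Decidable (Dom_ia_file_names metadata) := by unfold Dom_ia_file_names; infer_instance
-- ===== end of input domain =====

-- B replaces A's single accumulating loop (two sentinel variables, if/elif) with two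
-- independent first-match searches (next() over generator expressions); idiomatic, same cost.


-- ===== PORT A =====
-- file_record.get("name", "") : first-match lookup with default on the assoc list
def pvName (f : List (String × String)) : String := (f.lookup "name").getD ""
-- name.endswith("_djvu.txt") / name.endswith("_djvu.xml")
def pvIsTxt (f : List (String × String)) : Bool := PySem.Str.endswith (pvName f) "_djvu.txt"
def pvIsXml (f : List (String × String)) : Bool := PySem.Str.endswith (pvName f) "_djvu.xml"

def ia_file_names (metadata : List (String × List (List (String × String)))) : Option String × Option String :=
  let files := (metadata.lookup "files").getD []   -- metadata.get("files", [])
  files.foldl (fun (st : Option String × Option String) file_record =>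
    if pvIsTxt file_record ∧ st.1 = none then (some (pvName file_record), st.2)
    else if pvIsXml file_record ∧ st.2 = none then (st.1, some (pvName file_record))
    else st) (none, none)

-- ===== PORT B =====
def ia_file_names_alt (metadata : List (String × List (List (String × String)))) : Option String × Option String :=
  let files := (metadata.lookup "files").getD []
  ((files.find? pvIsTxt).map pvName, (files.find? pvIsXml).map pvName)

-- ===== PRECONDITION & SPEC =====
def Spec_ia_file_names (metadata : List (String × List (List (String × String)))) (out : Option String × Option String) : Prop := out = ia_file_names_alt metadata
instance (metadata : List (String × List (List (String × String)))) (out : Option String × Option String) : Decidable (Spec_ia_file_names metadata out) := by unfold Spec_ia_file_names; infer_instance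

-- ===== CLAIM (what is proved, stated in full; the proofs are below) =====
def Claim_equal_ia_file_names : Prop := ∀ (metadata : List (String × List (List (String × String)))), Dom_ia_file_names metadata → Spec_ia_file_names metadata (ia_file_names metadata)

-- ===== LEMMAS AND PROOFS =====

-- no name ends in both "_djvu.txt" and "_djvu.xml": equal-length suffixes of one list coincide
theorem pv_not_both (f : List (String × String)) (h1 : pvIsTxt f = true) :
    pvIsXml f = false := by
  by_contra h
  have h2 : pvIsXml f = true := by simpa using h
  unfold pvIsTxt at h1
  unfold pvIsXml at h2
  simp only [PySem.Str.endswith_eq] at h1 h2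
  rw [PySem.Chars.endswith_iff] at h1 h2
  obtain ⟨t1, e1⟩ := h1
  obtain ⟨t2, e2⟩ := h2
  rw [← e2] at e1
  have hlen : t1.length = t2.length := by
    have := congrArg List.length e1
    simp at this
    omega
  have := (List.append_inj e1 hlen).2
  simp at this

-- A's loop from an arbitrary state = componentwise orElse of B's two first-match searches
theorem pv_loop_eq (files : List (List (String × String))) (t x : Option String) :
    files.foldl (fun (st : Option String × Option String) file_record =>
      if pvIsTxt file_record ∧ st.1 = none then (some (pvName file_record), st.2)
      else if pvIsXml file_record ∧ st.2 = none then (st.1, some (pvName file_record))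
      else st) (t, x)
    = (t.orElse (fun _ => (files.find? pvIsTxt).map pvName),
       x.orElse (fun _ => (files.find? pvIsXml).map pvName)) := by
  induction files generalizing t x with
  | nil => cases t <;> cases x <;> rfl
  | cons f rest ih =>
    simp only [List.foldl_cons, List.find?_cons]
    by_cases htxt : pvIsTxt f = true
    · have hxml := pv_not_both f htxt
      cases t with
      | none => simp [htxt, hxml, ih]
      | some a => simp [htxt, hxml, ih]
    · by_cases hxml : pvIsXml f = true
      · cases x with
        | none => simp [htxt, hxml, ih]
        | some a => simp [htxt, hxml, ih]
      · simp [htxt, hxml, ih]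

-- ===== VERDICT (by name: the statement is the Claim_ definition above) =====
theorem ia_file_names_spec : Claim_equal_ia_file_names := by
  intro metadata _
  show _ = _
  simp only [ia_file_names, ia_file_names_alt]
  rw [pv_loop_eq]
  rfl
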